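-- pv_equiv track=rewrite | github.com/dark-w/demo-everything | demo/ut/rota/operators/mod/control.py | __check_n2k
-- ===== SOURCE A (Python) =====
-- def __check_n2k(n, k):
--     if n > 0 and n & (n - 1) == 0:
--         m = 0
--         while n > 1:
--             n >>= 1
--             m += 1
--         return m == k
--     return k == -1
-- ===== SOURCE B (Python) =====
-- def __check_n2k(n, k):
--     e = -1
--     if n > 0 and n & (n - 1) == 0:
--         e = n.bit_length() - 1
--     return e == k
-- ===== Notes on version B (the rewrite author's own statement) =====
-- stated objective: simpler
-- what changed: Replaces the bit-counting while-loop with the closed form n.bit_length()-1 and collapses A's two return paths into a single comparison through a -1 sentinel exponent.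
import Mathlib
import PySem

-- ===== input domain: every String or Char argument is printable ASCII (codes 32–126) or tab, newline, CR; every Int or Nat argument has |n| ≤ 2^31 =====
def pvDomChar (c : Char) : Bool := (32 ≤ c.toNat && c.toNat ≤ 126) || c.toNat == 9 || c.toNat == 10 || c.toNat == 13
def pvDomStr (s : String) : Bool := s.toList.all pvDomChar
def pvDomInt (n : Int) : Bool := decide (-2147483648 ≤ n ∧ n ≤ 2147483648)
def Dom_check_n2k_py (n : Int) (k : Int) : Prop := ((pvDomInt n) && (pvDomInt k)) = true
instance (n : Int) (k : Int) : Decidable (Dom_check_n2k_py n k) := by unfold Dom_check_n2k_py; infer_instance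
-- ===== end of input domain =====

-- B replaces A's bit-counting while-loop with the closed form bit_length()-1 and a -1 sentinel,
-- collapsing the two return paths into one comparison (objective: simpler).


-- ===== PORT A =====
-- the 'while n > 1: n >>= 1; m += 1' loop; returns the final m
def check_n2k_loop (n : Int) (m : Int) : Int :=
  if 1 < n then check_n2k_loop (n >>> (1:Nat)) (m + 1) else m
termination_by n.toNat
decreasing_by
  rw [Int.shiftRight_eq_div_pow, pow_one]
  omega

def check_n2k_py (n : Int) (k : Int) : Bool :=
  if n > 0 && (PySem.Int.band n (n - 1) == 0) then
    check_n2k_loop n 0 == k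
  else
    k == -1

-- ===== PORT B =====
def check_n2k_py_alt (n : Int) (k : Int) : Bool :=
  let e : Int :=
    if n > 0 && (PySem.Int.band n (n - 1) == 0) then
      (PySem.Int.bitLength n : Int) - 1   -- n.bit_length() - 1
    else
      -1
  e == k

-- ===== PRECONDITION & SPEC =====
def Spec_check_n2k_py (n : Int) (k : Int) (out : Bool) : Prop := out = check_n2k_py_alt n k
instance (n : Int) (k : Int) (out : Bool) : Decidable (Spec_check_n2k_py n k out) := by unfold Spec_check_n2k_py; infer_instance

-- ===== CLAIM (what is proved, stated in full; the proofs are below) =====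
def Claim_equal_check_n2k_py : Prop := ∀ (n : Int) (k : Int), Dom_check_n2k_py n k → Spec_check_n2k_py n k (check_n2k_py n k)

-- ===== LEMMAS AND PROOFS =====

-- A's halving loop counts exactly bit_length(n) - 1 steps for any positive n.
theorem check_n2k_loop_eq (N : Nat) : ∀ (n m : Int), n.toNat = N → 0 < n →
    check_n2k_loop n m = m + ((PySem.Int.bitLength n : Int) - 1) := by
  induction N using Nat.strong_induction_on with
  | _ N ih =>
    intro n m hN hn
    rw [check_n2k_loop.eq_def]
    by_cases h : 1 < n
    · have hs : n >>> (1:Nat) = PySem.Int.floordiv n 2 := by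
        rw [Int.shiftRight_eq_div_pow, pow_one,
          PySem.Int.floordiv_eq_ediv_of_pos (a := n) (by omega)]
        norm_num
      have hfd : PySem.Int.floordiv n 2 = n / 2 :=
        PySem.Int.floordiv_eq_ediv_of_pos (by omega)
      have hlt : (n >>> (1:Nat)).toNat < N := by
        rw [hs, hfd]; omega
      have hpos : 0 < n >>> (1:Nat) := by rw [hs, hfd]; omega
      rw [if_pos h, ih _ hlt _ _ rfl hpos,
        PySem.Int.bitLength_of_pos (n := n) (by omega), ← hs]
      push_cast
      omega
    · have hn1 : n = 1 := by omega
      subst hn1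
      rw [if_neg h]
      norm_num [show PySem.Int.bitLength 1 = 1 from by decide]

-- ===== VERDICT (by name: the statement is the Claim_ definition above) =====
theorem check_n2k_py_spec : Claim_equal_check_n2k_py := by
  intro n k _
  unfold Spec_check_n2k_py check_n2k_py check_n2k_py_alt
  by_cases h : (n > 0 && (PySem.Int.band n (n - 1) == 0)) = true
  · have hn : 0 < n := by
      rcases Bool.and_eq_true_iff.mp h with ⟨h1, _⟩
      exact of_decide_eq_true h1
    simp only [h, if_pos]
    rw [check_n2k_loop_eq n.toNat n 0 rfl hn]
    norm_num
  · simp only [Bool.not_eq_true] at h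
    simp only [h, Bool.false_eq_true, if_neg, not_false_iff]
    simp [eq_comm]
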